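-- pv_equiv track=rewrite | github.com/breivens/scriptingtalen | additional exercise series/series_08 [Python]/D/Doubles.py | doubles
-- ===== SOURCE A (Python) =====
-- def doubles(sequence: list):
--     once, multiple = set(), set()
--     for number in sequence:
--         if sequence.count(number) == 1:
--             once.add(number)
--         else:
--             multiple.add(number)
--     return once, multiple
-- ===== SOURCE B (Python) =====
-- def doubles(sequence: list):
--     counts = {}
--     for number in sequence:
--         counts[number] = counts.get(number, 0) + 1
--     once = {n for n, c in counts.items() if c == 1}
--     multiple = {n for n, c in counts.items() if c != 1}
--     return once, multiple
-- ===== Notes on version B (the rewrite author's own statement) =====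
-- stated objective: faster
-- what changed: B builds a count table in one pass and classifies each distinct value once, instead of A's full sequence.count scan for every element.
import Mathlib
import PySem

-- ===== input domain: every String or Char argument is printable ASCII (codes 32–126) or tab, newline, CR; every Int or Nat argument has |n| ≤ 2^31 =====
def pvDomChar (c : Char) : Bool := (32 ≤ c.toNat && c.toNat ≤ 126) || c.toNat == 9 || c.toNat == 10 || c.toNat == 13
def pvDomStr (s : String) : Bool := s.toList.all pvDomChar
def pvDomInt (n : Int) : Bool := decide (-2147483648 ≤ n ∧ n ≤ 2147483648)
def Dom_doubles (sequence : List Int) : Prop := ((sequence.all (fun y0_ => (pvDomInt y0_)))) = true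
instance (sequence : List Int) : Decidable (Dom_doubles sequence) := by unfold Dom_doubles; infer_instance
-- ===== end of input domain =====

-- B replaces A's per-element `sequence.count` scan (quadratic) by one counting pass over a dict
-- followed by one classification pass over the distinct values (objective: faster).

-- ===== PORT A =====
def doubles (sequence : List Int) : List Int × List Int :=
  sequence.foldl
    (fun st number =>
      if PySem.List.count sequence number == 1 then (PySem.Set.add st.1 number, st.2)
      else (st.1, PySem.Set.add st.2 number))
    ((PySem.Set.empty : PySem.Set Int), (PySem.Set.empty : PySem.Set Int))

-- ===== PORT B =====
def doubles_alt (sequence : List Int) : List Int × List Int :=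
  let counts : PySem.Dict Int Int :=
    sequence.foldl (fun d number => d.insert number (d.getD number 0 + 1)) PySem.Dict.empty
  let once : PySem.Set Int :=
    PySem.Set.ofList ((counts.items.filter (fun p => p.2 == 1)).map Prod.fst)
  let multiple : PySem.Set Int :=
    PySem.Set.ofList ((counts.items.filter (fun p => !(p.2 == 1))).map Prod.fst)
  (once, multiple)

-- ===== PRECONDITION & SPEC =====
def Spec_doubles (sequence : List Int) (out : List Int × List Int) : Prop := out = doubles_alt sequence
instance (sequence : List Int) (out : List Int × List Int) : Decidable (Spec_doubles sequence out) := by unfold Spec_doubles; infer_instance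

-- ===== CLAIM (what is proved, stated in full; the proofs are below) =====
def Claim_equal_doubles : Prop := ∀ (sequence : List Int), Dom_doubles sequence → Spec_doubles sequence (doubles sequence)

-- ===== LEMMAS AND PROOFS =====

-- B's dict-building loop is exactly Counter(sequence).
theorem counts_eq_counter (xs : List Int) :
    xs.foldl (fun d number => d.insert number (d.getD number 0 + 1)) (PySem.Dict.empty : PySem.Dict Int Int)
      = PySem.Dict.counter xs := by
  rw [PySem.Dict.counter_eq_foldl]
  have h : (fun (d : PySem.Dict Int Int) (number : Int) => d.insert number (d.getD number 0 + 1))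
      = (fun (d : PySem.Dict Int Int) (x : Int) => d.modify x 0 (· + 1)) := by
    funext d k
    simp [PySem.Dict.modify, PySem.Dict.insert, PySem.Dict.getD]
  rw [h]

-- A's single loop over a pair of sets is the pair of the two one-set loops.
theorem pair_fold (p : Int → Bool) (xs : List Int) (o m : PySem.Set Int) :
    xs.foldl (fun st n => if p n then (PySem.Set.add st.1 n, st.2) else (st.1, PySem.Set.add st.2 n)) (o, m)
      = (xs.foldl (fun s n => if p n then PySem.Set.add s n else s) o,
         xs.foldl (fun s n => if p n then s else PySem.Set.add s n) m) := by
  induction xs generalizing o m with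
  | nil => rfl
  | cons x xs ih =>
      simp only [List.foldl_cons]
      by_cases h : p x = true <;> simp [h, ih]

-- a conditional add-loop is the add-loop over the filtered list
theorem cond_add_fold (p : Int → Bool) (xs : List Int) (s : PySem.Set Int) :
    xs.foldl (fun s n => if p n then PySem.Set.add s n else s) s
      = (xs.filter p).foldl PySem.Set.add s := by
  induction xs generalizing s with
  | nil => rfl
  | cons x xs ih =>
      by_cases h : p x = true <;> simp [h, ih]

theorem cond_add_fold_neg (p : Int → Bool) (xs : List Int) (s : PySem.Set Int) :
    xs.foldl (fun s n => if p n then s else PySem.Set.add s n) s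
      = (xs.filter (fun n => !(p n))).foldl PySem.Set.add s := by
  induction xs generalizing s with
  | nil => rfl
  | cons x xs ih =>
      by_cases h : p x = true <;> simp [h, ih]

-- dedup (Set.ofList) commutes with filtering
theorem filter_add (p : Int → Bool) (s : PySem.Set Int) (x : Int) :
    (PySem.Set.add s x).filter p = if p x then PySem.Set.add (s.filter p) x else s.filter p := by
  by_cases hc : x ∈ s
  · have h1 : PySem.Set.add s x = s := by
      simp [PySem.Set.add, hc]
    by_cases hp : p x = true
    · have h2 : PySem.Set.add (s.filter p) x = s.filter p := by
        simp [PySem.Set.add, List.mem_filter, hc, hp]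
      simp [h1, h2, hp]
    · simp [h1, hp]
  · have h1 : PySem.Set.add s x = s ++ [x] := by
      simp [PySem.Set.add, hc]
    by_cases hp : p x = true
    · have h2 : PySem.Set.add (s.filter p) x = s.filter p ++ [x] := by
        simp [PySem.Set.add, List.mem_filter, hc]
      simp [h1, h2, hp, List.filter_append]
    · simp [h1, hp, List.filter_append]

theorem filter_fold_add (p : Int → Bool) (xs : List Int) (s : PySem.Set Int) :
    (xs.foldl PySem.Set.add s).filter p = (xs.filter p).foldl PySem.Set.add (s.filter p) := by
  induction xs generalizing s with
  | nil => rfl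
  | cons x xs ih =>
      simp only [List.foldl_cons, List.filter_cons]
      rw [ih, filter_add]
      by_cases hp : p x = true <;> simp [hp]

theorem ofList_filter (p : Int → Bool) (xs : List Int) :
    PySem.Set.ofList (xs.filter p) = (PySem.Set.ofList xs).filter p := by
  rw [PySem.Set.ofList_eq_foldl, PySem.Set.ofList_eq_foldl, filter_fold_add]
  rfl

-- both components of A, rewritten as filters of the dedup of the input
theorem doubles_eq (xs : List Int) :
    doubles xs = (PySem.Set.ofList (xs.filter (fun n => PySem.List.count xs n == 1)),
                  PySem.Set.ofList (xs.filter (fun n => !(PySem.List.count xs n == 1)))) := by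
  unfold doubles
  rw [pair_fold, cond_add_fold, cond_add_fold_neg,
    PySem.Set.ofList_eq_foldl, PySem.Set.ofList_eq_foldl]
  rfl

theorem doubles_alt_eq (xs : List Int) :
    doubles_alt xs = ((PySem.Set.ofList xs).filter (fun n => PySem.List.count xs n == 1),
                      (PySem.Set.ofList xs).filter (fun n => !(PySem.List.count xs n == 1))) := by
  have hq : ∀ (q : Int → Bool),
      PySem.Set.ofList (((List.map (fun k => (k, (List.count k xs : Int))) (PySem.Set.ofList xs)).filter
          (fun p => q p.2)).map Prod.fst)
        = (PySem.Set.ofList xs).filter (fun k => q ((List.count k xs : Int))) := by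
    intro q
    rw [List.filter_map, List.map_map]
    have hid : (Prod.fst ∘ fun k => (k, (List.count k xs : Int))) = id := by funext k; rfl
    rw [hid, List.map_id]
    exact PySem.Set.ofList_eq_self_of_nodup _ (List.Nodup.filter _ (PySem.Set.nodup_ofList xs))
  have hpred : ∀ k : Int, ((List.count k xs : Int) == 1) = (PySem.List.count xs k == 1) := by
    intro k
    rw [PySem.List.count_eq]
    by_cases h : List.count k xs = 1
    · simp [h]
    · have h1 : ((List.count k xs : Int) == 1) = false := by simp; omega
      have h2 : (List.count k xs == 1) = false := by simp [h]
      rw [h1, h2]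
  unfold doubles_alt
  simp only [counts_eq_counter, PySem.Dict.items_counter]
  rw [hq (fun c => c == 1), hq (fun c => !(c == 1)), Prod.mk.injEq]
  constructor <;> · congr 1; funext k; rw [hpred]

-- ===== VERDICT (by name: the statement is the Claim_ definition above) =====
theorem doubles_spec : Claim_equal_doubles := by
  intro sequence _
  unfold Spec_doubles
  rw [doubles_eq, doubles_alt_eq, ofList_filter, ofList_filter]
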